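-- pv_equiv track=rewrite | github.com/joshuatshirley/IngestForge | ingestforge/ingest/pdf_splitter.py | _get_split_boundaries
-- ===== SOURCE A (Python) =====
-- from typing import Any, List, Optional, Tuple
--
-- def _get_split_boundaries(
--     toc: list[Any], deep_split: bool
-- ) -> List[Tuple[int, str]]:
--     """
--     Identify split points from TOC.
--
--     Args:
--         toc: Table of contents from PyMuPDF
--         deep_split: Include subsections if True
--
--     Returns:
--         List of (page_index, title) tuples
--     """
--     if not toc:
--         return []
--
--     chapters = []
--     seen_pages = set()
--
--     for entry in toc:
--         level, title, page_num = entry[0], entry[1], entry[2]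
--
--         # Skip subsections unless deep_split enabled
--         if not deep_split and level > 1:
--             continue
--
--         page_index = page_num - 1
--         if page_index < 0:
--             continue
--
--         if page_index not in seen_pages:
--             chapters.append((page_index, title))
--             seen_pages.add(page_index)
--
--     return sorted(chapters, key=lambda x: x[0])
-- ===== SOURCE B (Python) =====
-- from typing import Any, List, Tuple
--
--
-- def _get_split_boundaries(
--     toc: list, deep_split: bool
-- ) -> List[Tuple[int, str]]:
--     """Collect qualifying (page_index, title) pairs, stable-sort by page,
--     then keep the first entry of each run of equal pages."""
--     if not toc:
--         return []
--
--     candidates = [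
--         (entry[2] - 1, entry[1])
--         for entry in toc
--         if (deep_split or entry[0] <= 1) and entry[2] - 1 >= 0
--     ]
--     candidates = sorted(candidates, key=lambda x: x[0])
--
--     result = []
--     last = None
--     for e in candidates:
--         if last != e[0]:
--             result.append(e)
--             last = e[0]
--     return result
-- ===== Notes on version B (the rewrite author's own statement) =====
-- stated objective: alternative
-- what changed: Replaces the seen-set membership dedup (dedup before sort) by a comprehension, a stable sort, and a single adjacency-dedup pass over the sorted candidates (dedup after sort), relying on sort stability to keep the first title per page.
import Mathlib
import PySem

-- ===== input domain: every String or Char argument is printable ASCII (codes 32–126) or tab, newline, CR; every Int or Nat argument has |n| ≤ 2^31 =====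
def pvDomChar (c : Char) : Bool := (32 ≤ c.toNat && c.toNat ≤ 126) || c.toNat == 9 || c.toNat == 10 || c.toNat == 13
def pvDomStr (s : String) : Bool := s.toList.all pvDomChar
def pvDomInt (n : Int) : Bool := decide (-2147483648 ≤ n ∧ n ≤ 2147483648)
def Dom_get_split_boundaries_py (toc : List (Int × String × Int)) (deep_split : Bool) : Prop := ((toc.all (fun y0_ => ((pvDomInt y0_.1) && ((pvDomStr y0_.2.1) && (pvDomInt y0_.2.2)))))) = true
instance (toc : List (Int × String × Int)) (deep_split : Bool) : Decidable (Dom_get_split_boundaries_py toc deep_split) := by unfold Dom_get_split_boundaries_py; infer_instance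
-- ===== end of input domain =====

-- B replaces A's seen-set dedup-then-sort by collect, stable sort, then one adjacency-dedup pass (objective: alternative, same cost).

-- ===== PORT A =====
-- the body of A's for-loop (state: (chapters, seen_pages))
def pvStepA (deep_split : Bool) (st : List (Int × String) × PySem.Set Int)
    (entry : Int × String × Int) : List (Int × String) × PySem.Set Int :=
  let level := entry.1
  let title := entry.2.1
  let page_num := entry.2.2
  if deep_split = false ∧ 1 < level then st
  else
    let page_index := page_num - 1
    if page_index < 0 then st
    else if PySem.Set.contains st.2 page_index then st
    else (st.1 ++ [(page_index, title)], PySem.Set.add st.2 page_index)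

def get_split_boundaries_py (toc : List (Int × String × Int)) (deep_split : Bool) : List (Int × String) :=
  if toc = [] then []
  else
    let st := toc.foldl (pvStepA deep_split) ([], PySem.Set.empty)
    PySem.List.sorted st.1 (fun x => x.1)

-- ===== PORT B =====
-- the comprehension of Source B
def pvCands (toc : List (Int × String × Int)) (deep_split : Bool) : List (Int × String) :=
  (toc.filter (fun e => (deep_split || decide (e.1 ≤ 1)) && decide (0 ≤ e.2.2 - 1))).map
    (fun e => (e.2.2 - 1, e.2.1))

-- the body of Source B's dedup loop (state: (result, last))
def pvStepB (st : List (Int × String) × Option Int) (e : Int × String) :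
    List (Int × String) × Option Int :=
  if st.2 = some e.1 then st else (st.1 ++ [e], some e.1)

def get_split_boundaries_py_alt (toc : List (Int × String × Int)) (deep_split : Bool) : List (Int × String) :=
  if toc = [] then []
  else
    let candidates := PySem.List.sorted (pvCands toc deep_split) (fun x => x.1)
    (candidates.foldl pvStepB ([], none)).1

-- ===== PRECONDITION & SPEC =====
def Spec_get_split_boundaries_py (toc : List (Int × String × Int)) (deep_split : Bool) (out : List (Int × String)) : Prop := out = get_split_boundaries_py_alt toc deep_split
instance (toc : List (Int × String × Int)) (deep_split : Bool) (out : List (Int × String)) : Decidable (Spec_get_split_boundaries_py toc deep_split out) := by unfold Spec_get_split_boundaries_py; infer_instance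

-- ===== CLAIM (what is proved, stated in full; the proofs are below) =====
def Claim_equal_get_split_boundaries_py : Prop := ∀ (toc : List (Int × String × Int)) (deep_split : Bool), Dom_get_split_boundaries_py toc deep_split → Spec_get_split_boundaries_py toc deep_split (get_split_boundaries_py toc deep_split)

-- ===== LEMMAS AND PROOFS =====

-- first-occurrence dedup by key (what A's seen-set loop computes)
def pvDD (seen : List Int) : List (Int × String) → List (Int × String)
  | [] => []
  | x :: t => if x.1 ∈ seen then pvDD seen t else x :: pvDD (seen ++ [x.1]) t

-- adjacency dedup by key (what B's last-tracking loop computes)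
def pvAdjA (k : Int) : List (Int × String) → List (Int × String)
  | [] => []
  | y :: t => if y.1 = k then pvAdjA k t else y :: pvAdjA y.1 t

def pvAdj : List (Int × String) → List (Int × String)
  | [] => []
  | x :: t => x :: pvAdjA x.1 t

-- A's loop = first-occurrence dedup of the candidate list
lemma pvA1 (deep_split : Bool) :
    ∀ (toc : List (Int × String × Int)) (r : List (Int × String)) (seen : List Int),
      (toc.foldl (pvStepA deep_split) (r, seen)).1 = r ++ pvDD seen (pvCands toc deep_split) := by
  intro toc
  induction toc with
  | nil => intro r seen; simp [pvCands, pvDD]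
  | cons e t ih =>
    intro r seen
    by_cases hq : ((deep_split || decide (e.1 ≤ 1)) && decide (0 ≤ e.2.2 - 1)) = true
    · have hcands : pvCands (e :: t) deep_split =
          (e.2.2 - 1, e.2.1) :: pvCands t deep_split := by
        simp only [pvCands, List.filter_cons]
        rw [if_pos hq]
        simp
      simp only [Bool.and_eq_true, Bool.or_eq_true, decide_eq_true_eq] at hq
      have hskip : ¬ (deep_split = false ∧ 1 < e.1) := by
        rcases hq.1 with h | h
        · simp [h]
        · intro hc; omega
      have hneg : ¬ (e.2.2 - 1 < 0) := by omega
      have hstep : pvStepA deep_split (r, seen) e =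
          (if (e.2.2 - 1) ∈ seen then (r, seen)
           else (r ++ [(e.2.2 - 1, e.2.1)], seen ++ [e.2.2 - 1])) := by
        by_cases hm : (e.2.2 - 1) ∈ seen
        · simp [pvStepA, hskip, hneg, PySem.Set.contains, hm]
        · simp [pvStepA, hskip, hneg, PySem.Set.contains, PySem.Set.add, hm]
      rw [List.foldl_cons, hstep, hcands]
      by_cases hm : (e.2.2 - 1) ∈ seen
      · rw [if_pos hm, ih]
        simp [pvDD, hm]
      · rw [if_neg hm, ih]
        simp [pvDD, hm]
    · have hcands : pvCands (e :: t) deep_split = pvCands t deep_split := by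
        simp only [pvCands, List.filter_cons]
        rw [if_neg hq]
      simp only [Bool.and_eq_true, Bool.or_eq_true, decide_eq_true_eq, not_and, not_le] at hq
      have hstep : pvStepA deep_split (r, seen) e = (r, seen) := by
        by_cases h1 : deep_split = false ∧ 1 < e.1
        · simp [pvStepA, h1]
        · have hlt : e.2.2 - 1 < 0 := by
            cases deep_split
            · simp at h1
              apply hq; right; omega
            · apply hq; left; rfl
          simp [pvStepA, h1, hlt]
      rw [List.foldl_cons, hstep, ih, hcands]

-- B's loop = adjacency dedup
lemma pvB1a : ∀ (l : List (Int × String)) (r : List (Int × String)) (k : Int),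
    (l.foldl pvStepB (r, some k)).1 = r ++ pvAdjA k l := by
  intro l
  induction l with
  | nil => intro r k; simp [pvAdjA]
  | cons e t ih =>
    intro r k
    by_cases h : e.1 = k
    · simp [pvStepB, h, pvAdjA, ih]
    · simp [pvStepB, Ne.symm h, pvAdjA, h, ih]

lemma pvB1 : ∀ (l : List (Int × String)) (r : List (Int × String)),
    (l.foldl pvStepB (r, none)).1 = r ++ pvAdj l := by
  intro l r
  cases l with
  | nil => simp [pvAdj]
  | cons e t => simp [pvStepB, pvAdj, pvB1a]

-- appending one candidate to a first-occurrence dedup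
lemma pvDD_snoc : ∀ (l : List (Int × String)) (seen : List Int) (x : Int × String),
    pvDD seen (l ++ [x]) =
      if x.1 ∈ seen ∨ x.1 ∈ l.map Prod.fst then pvDD seen l else pvDD seen l ++ [x] := by
  intro l
  induction l with
  | nil => intro seen x; by_cases h : x.1 ∈ seen <;> simp [pvDD, h]
  | cons y t ih =>
    intro seen x
    simp only [List.cons_append, pvDD, List.map_cons, List.mem_cons]
    by_cases hy : y.1 ∈ seen
    · rw [if_pos hy, if_pos hy, ih]
      by_cases hx : x.1 ∈ seen ∨ x.1 ∈ t.map Prod.fst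
      · rw [if_pos hx, if_pos (by tauto)]
      · rw [if_neg hx, if_neg (by
          rintro (h | h | h)
          · exact hx (Or.inl h)
          · exact hx (Or.inl (h ▸ hy))
          · exact hx (Or.inr h))]
    · rw [if_neg hy, if_neg hy, ih]
      have hmem : x.1 ∈ seen ++ [y.1] ∨ x.1 ∈ t.map Prod.fst ↔
          x.1 ∈ seen ∨ x.1 = y.1 ∨ x.1 ∈ t.map Prod.fst := by
        simp [List.mem_append]; tauto
      by_cases hx : x.1 ∈ seen ∨ x.1 = y.1 ∨ x.1 ∈ t.map Prod.fst
      · rw [if_pos (hmem.mpr hx), if_pos hx]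
      · rw [if_neg (fun h => hx (hmem.mp h)), if_neg hx, List.cons_append]

-- sorted of a snoc is an insertion into sorted
lemma pvSorted_snoc (l : List (Int × String)) (x : Int × String) :
    PySem.List.sorted (l ++ [x]) (fun p => p.1) =
      PySem.List.insertBy (fun a b => decide (a.1 < b.1)) x
        (PySem.List.sorted l (fun p => p.1)) := by
  rw [PySem.List.sorted_eq_foldl_insertBy, PySem.List.sorted_eq_foldl_insertBy,
    List.foldl_append]
  rfl

-- inserting a fresh key commutes with adjacency dedup (run-local version)
lemma pvAdjA_insert_notmem (x : Int × String) :
    ∀ (ys : List (Int × String)) (k : Int), k < x.1 → x.1 ∉ ys.map Prod.fst →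
      pvAdjA k (PySem.List.insertBy (fun a b => decide (a.1 < b.1)) x ys) =
        PySem.List.insertBy (fun a b => decide (a.1 < b.1)) x (pvAdjA k ys) := by
  intro ys
  induction ys with
  | nil =>
    intro k hk _
    show pvAdjA k [x] = PySem.List.insertBy (fun a b => decide (a.1 < b.1)) x []
    rw [pvAdjA, if_neg (by omega : ¬ x.1 = k)]
    rfl
  | cons y t ih =>
    intro k hk hx
    simp only [List.map_cons, List.mem_cons, not_or] at hx
    by_cases hb : x.1 < y.1
    · simp only [PySem.List.insertBy, decide_eq_true_eq, if_pos hb]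
      rw [pvAdjA, if_neg (by omega : ¬ x.1 = k), pvAdjA, if_neg (by omega : ¬ y.1 = x.1)]
      rw [pvAdjA]
      by_cases hyk : y.1 = k
      · omega
      · rw [if_neg hyk, PySem.List.insertBy, if_pos (by simpa using hb)]
    · simp only [PySem.List.insertBy, decide_eq_true_eq, if_neg hb]
      have hyx : y.1 < x.1 := lt_of_le_of_ne (by omega) (fun h => hx.1 h.symm)
      rw [pvAdjA, pvAdjA]
      by_cases hyk : y.1 = k
      · rw [if_pos hyk, if_pos hyk, ih k hk hx.2]
      · rw [if_neg hyk, if_neg hyk, ih y.1 hyx hx.2,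
          PySem.List.insertBy, if_neg (by simpa using hb)]

lemma pvAdj_insert_notmem (x : Int × String) (s : List (Int × String))
    (hx : x.1 ∉ s.map Prod.fst) :
    pvAdj (PySem.List.insertBy (fun a b => decide (a.1 < b.1)) x s) =
      PySem.List.insertBy (fun a b => decide (a.1 < b.1)) x (pvAdj s) := by
  cases s with
  | nil => simp [PySem.List.insertBy, pvAdj, pvAdjA]
  | cons y t =>
    simp only [List.map_cons, List.mem_cons, not_or] at hx
    by_cases hb : x.1 < y.1
    · simp only [PySem.List.insertBy, decide_eq_true_eq, if_pos hb]
      rw [pvAdj, pvAdjA, if_neg (by omega : ¬ y.1 = x.1), pvAdj,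
        PySem.List.insertBy, if_pos (by simpa using hb)]
    · have hyx : y.1 < x.1 := lt_of_le_of_ne (by omega) (fun h => hx.1 h.symm)
      simp only [PySem.List.insertBy, decide_eq_true_eq, if_neg hb]
      rw [pvAdj, pvAdj, pvAdjA_insert_notmem x t y.1 hyx hx.2,
        PySem.List.insertBy, if_neg (by simpa using hb)]

-- inserting a duplicate key into a key-sorted list leaves the adjacency dedup unchanged
lemma pvAdjA_insert_mem (x : Int × String) :
    ∀ (ys : List (Int × String)) (k : Int),
      ys.Pairwise (fun a b => a.1 ≤ b.1) → (∀ z ∈ ys, k ≤ z.1) → k ≤ x.1 →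
      (x.1 = k ∨ x.1 ∈ ys.map Prod.fst) →
      pvAdjA k (PySem.List.insertBy (fun a b => decide (a.1 < b.1)) x ys) = pvAdjA k ys := by
  intro ys
  induction ys with
  | nil =>
    intro k _ _ _ hx
    simp only [List.map_nil, List.not_mem_nil, or_false] at hx
    simp [PySem.List.insertBy, pvAdjA, hx]
  | cons y t ih =>
    intro k hp hlb hkx hx
    have hpt := (List.pairwise_cons.mp hp).2
    have hyt := (List.pairwise_cons.mp hp).1
    simp only [List.map_cons, List.mem_cons] at hx
    by_cases hb : x.1 < y.1
    · have hxk : x.1 = k := by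
        rcases hx with h | h | h
        · exact h
        · omega
        · rcases List.mem_map.mp h with ⟨z, hz, hzk⟩
          have := hyt z hz; omega
      simp only [PySem.List.insertBy, decide_eq_true_eq, if_pos hb]
      rw [pvAdjA, if_pos hxk]
    · simp only [PySem.List.insertBy, decide_eq_true_eq, if_neg hb]
      rw [pvAdjA, pvAdjA]
      by_cases hyk : y.1 = k
      · rw [if_pos hyk, if_pos hyk]
        refine ih k hpt (fun z hz => hyk ▸ hyt z hz) hkx ?_
        rcases hx with h | h | h
        · exact Or.inl h
        · exact Or.inl (h.trans hyk)
        · exact Or.inr h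
      · rw [if_neg hyk, if_neg hyk]
        have hky : k ≤ y.1 := hlb y (List.mem_cons_self ..)
        have hykx : x.1 = y.1 ∨ x.1 ∈ t.map Prod.fst := by
          rcases hx with h | h | h
          · exfalso; apply hyk; omega
          · exact Or.inl h
          · exact Or.inr h
        rw [ih y.1 hpt hyt (by omega) hykx]

lemma pvAdj_insert_mem (x : Int × String) (s : List (Int × String))
    (hp : s.Pairwise (fun a b => a.1 ≤ b.1)) (hx : x.1 ∈ s.map Prod.fst) :
    pvAdj (PySem.List.insertBy (fun a b => decide (a.1 < b.1)) x s) = pvAdj s := by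
  cases s with
  | nil => simp at hx
  | cons y t =>
    have hpt := (List.pairwise_cons.mp hp).2
    have hyt := (List.pairwise_cons.mp hp).1
    simp only [List.map_cons, List.mem_cons] at hx
    by_cases hb : x.1 < y.1
    · exfalso
      rcases hx with h | h
      · omega
      · rcases List.mem_map.mp h with ⟨z, hz, hzk⟩
        have := hyt z hz; omega
    · simp only [PySem.List.insertBy, decide_eq_true_eq, if_neg hb]
      rw [pvAdj, pvAdj,
        pvAdjA_insert_mem x t y.1 hpt hyt (by omega)
          (by rcases hx with h | h
              · exact Or.inl h
              · exact Or.inr h)]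

-- the core: sorting the first-occurrence dedup = adjacency dedup of the stable sort
lemma pvMain : ∀ (l : List (Int × String)),
    PySem.List.sorted (pvDD [] l) (fun p => p.1) =
      pvAdj (PySem.List.sorted l (fun p => p.1)) := by
  intro l
  induction l using List.reverseRecOn with
  | nil => simp [pvDD, pvAdj, PySem.List.sorted]
  | append_singleton l x ih =>
    have hperm : (PySem.List.sorted l (fun p => p.1)).Perm l :=
      PySem.List.sorted_perm l (fun p => p.1) false
    have hkeys : x.1 ∈ (PySem.List.sorted l (fun p => p.1)).map Prod.fst ↔
        x.1 ∈ l.map Prod.fst := (hperm.map Prod.fst).mem_iff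
    have hpair : (PySem.List.sorted l (fun p => p.1)).Pairwise (fun a b => a.1 ≤ b.1) :=
      PySem.List.sorted_pairwise l (fun p => p.1)
    rw [pvDD_snoc, pvSorted_snoc]
    by_cases hm : x.1 ∈ l.map Prod.fst
    · rw [if_pos (Or.inr hm), ih, pvAdj_insert_mem x _ hpair (hkeys.mpr hm)]
    · rw [if_neg (by simpa using hm), pvSorted_snoc, ih,
        pvAdj_insert_notmem x _ (fun h => hm (hkeys.mp h))]

-- ===== VERDICT (by name: the statement is the Claim_ definition above) =====
theorem get_split_boundaries_py_spec : Claim_equal_get_split_boundaries_py := by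
  intro toc deep_split _
  unfold Spec_get_split_boundaries_py get_split_boundaries_py get_split_boundaries_py_alt
  by_cases h : toc = []
  · simp [h]
  · simp only [if_neg h, PySem.Set.empty]
    rw [pvA1 deep_split toc [] [], List.nil_append, pvB1, List.nil_append, pvMain]
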